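-- pv_equiv track=rewrite | github.com/kazuhaking/Study-Code | Python/DS/Lab 1/lab1_9.py | convert
-- ===== SOURCE A (Python) =====
-- def convert(n):
--     lst = n.split(" ")
--     ans = ""
--     i = 0;
--     while i!=len(lst):
--         if i==1:
--             ans = ans + " not " + lst[i]
--         else:
--             ans = ans + lst[i] + " "
--         i += 1
--     return ans;
-- ===== SOURCE B (Python) =====
-- def convert(n):
--     lst = n.split(" ")
--     if len(lst) == 1:
--         return lst[0] + " "
--     return lst[0] + "  not " + lst[1] + "".join(w + " " for w in lst[2:])
-- ===== Notes on version B (the rewrite author's own statement) =====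
-- stated objective: simpler
-- what changed: Replaces the index-tested while loop with a head/middle/tail decomposition: a single-word early return, then head word, the fixed inserted text, the second word, and a join over the tail slice, with no per-index branching.
import Mathlib
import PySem

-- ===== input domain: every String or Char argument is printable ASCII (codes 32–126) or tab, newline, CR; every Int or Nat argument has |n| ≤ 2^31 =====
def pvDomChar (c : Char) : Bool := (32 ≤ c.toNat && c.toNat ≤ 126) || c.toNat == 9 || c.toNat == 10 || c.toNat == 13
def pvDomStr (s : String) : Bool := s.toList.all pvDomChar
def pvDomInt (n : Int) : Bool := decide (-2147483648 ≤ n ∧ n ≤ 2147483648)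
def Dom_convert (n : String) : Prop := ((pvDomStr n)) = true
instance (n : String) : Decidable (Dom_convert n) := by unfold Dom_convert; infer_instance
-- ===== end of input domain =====

-- B replaces A's index-tested while loop by a head/middle/tail decomposition (simpler; return value only).

-- ===== PORT A =====
-- while i != len(lst): if i == 1 then ans += " not " + lst[i] else ans += lst[i] + " "; i += 1
-- (strings handled on the List Char side, as PySem recommends; lst[i] is in range whenever read;
--  fuel = len(lst) + 1 iterations always suffice, since i steps by 1 from 0 and the loop exits at i = len)
def convertLoopA (lst : List (List Char)) : Nat → Nat → List Char → List Char
  | 0, _, ans => ans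
  | fuel + 1, i, ans =>
    if i = lst.length then ans
    else if i = 1 then convertLoopA lst fuel (i + 1) (ans ++ " not ".toList ++ lst.getD i [])
    else convertLoopA lst fuel (i + 1) (ans ++ lst.getD i [] ++ [' '])

def convert (n : String) : String :=
  let lst := PySem.Chars.splitOn n.toList [' ']
  String.ofList (convertLoopA lst (lst.length + 1) 0 [])

-- ===== PORT B =====
-- if len(lst) == 1: lst[0] + " "  else: lst[0] + "  not " + lst[1] + "".join(w + " " for w in lst[2:])
def convert_alt (n : String) : String :=
  let lst := PySem.Chars.splitOn n.toList [' ']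
  if lst.length = 1 then String.ofList (lst.headD [] ++ [' '])
  else String.ofList (lst.getD 0 [] ++ "  not ".toList ++ lst.getD 1 [] ++
                   ((lst.drop 2).map (· ++ [' '])).flatten)

-- ===== PRECONDITION & SPEC =====
def Spec_convert (n : String) (out : String) : Prop := out = convert_alt n
instance (n : String) (out : String) : Decidable (Spec_convert n out) := by unfold Spec_convert; infer_instance

-- ===== CLAIM (what is proved, stated in full; the proofs are below) =====
def Claim_equal_convert : Prop := ∀ (n : String), Dom_convert n → Spec_convert n (convert n)

-- ===== LEMMAS AND PROOFS =====

-- Python's str.split never returns an empty list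
theorem splitOn_go_ne_nil (sep : List Char) (fuel : Nat) (l cur : List Char)
    (acc : List (List Char)) : PySem.Chars.splitOn.go sep fuel l cur acc ≠ [] := by
  induction fuel generalizing l cur acc with
  | zero => simp [PySem.Chars.splitOn.go]
  | succ fuel ih =>
    cases l with
    | nil => simp [PySem.Chars.splitOn.go]
    | cons c rest =>
      rw [PySem.Chars.splitOn.go]
      split
      · exact ih _ _ _
      · exact ih _ _ _

theorem splitOn_ne_nil (s sep : List Char) : PySem.Chars.splitOn s sep ≠ [] :=
  splitOn_go_ne_nil _ _ _ _ _

-- the tail of A's loop (i ≥ 2) is exactly B's flattened tail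
theorem convertLoopA_tail (lst : List (List Char)) (fuel i : Nat) (ans : List Char)
    (hf : fuel + i = lst.length + 1) (hi : 2 ≤ i) :
    convertLoopA lst fuel i ans = ans ++ ((lst.drop i).map (· ++ [' '])).flatten := by
  induction fuel generalizing i ans with
  | zero =>
    rw [convertLoopA]
    simp [List.drop_eq_nil_of_le (show lst.length ≤ i by omega)]
  | succ fuel ih =>
    rw [convertLoopA]
    by_cases h : i = lst.length
    · simp [h, List.drop_eq_nil_of_le (le_refl lst.length)]
    · have hlt : i < lst.length := by omega
      simp only [h, if_false, show ¬ i = 1 by omega]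
      rw [ih (i + 1) _ (by omega) (by omega), List.drop_eq_getElem_cons hlt]
      simp only [List.getD_eq_getElem?_getD, List.getElem?_eq_getElem hlt, Option.getD_some,
        List.map_cons, List.flatten_cons]
      simp

theorem convertLoopA_eq (lst : List (List Char)) (hne : lst ≠ []) :
    convertLoopA lst (lst.length + 1) 0 [] =
      (if lst.length = 1 then lst.headD [] ++ [' ']
       else lst.getD 0 [] ++ "  not ".toList ++ lst.getD 1 [] ++
            ((lst.drop 2).map (· ++ [' '])).flatten) := by
  cases lst with
  | nil => exact absurd rfl hne
  | cons w0 rest =>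
    cases rest with
    | nil =>
      rw [convertLoopA]
      simp [convertLoopA]
    | cons w1 rest' =>
      rw [convertLoopA]
      simp only [List.length_cons, show ¬ (0 : Nat) = (rest'.length + 1 + 1) by omega,
        if_false, show ¬ (0 : Nat) = 1 by omega]
      rw [convertLoopA]
      simp only [List.length_cons, show ¬ (1 : Nat) = (rest'.length + 1 + 1) by omega,
        if_false]
      rw [convertLoopA_tail _ _ 2 _ (by simp) (le_refl 2)]
      simp [List.getD]

-- ===== VERDICT (by name: the statement is the Claim_ definition above) =====
theorem convert_spec : Claim_equal_convert := by
  intro n _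
  unfold Spec_convert
  show String.ofList (convertLoopA (PySem.Chars.splitOn n.toList [' '])
      ((PySem.Chars.splitOn n.toList [' ']).length + 1) 0 []) = convert_alt n
  rw [convertLoopA_eq _ (splitOn_ne_nil _ _)]
  by_cases hc : (PySem.Chars.splitOn n.toList [' ']).length = 1 <;>
    simp [convert_alt, hc]
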